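-- pv_equiv track=rewrite | github.com/excursionist1/python_exer | hello/exercise/day_exer.py | is_mixed
-- ===== SOURCE A (Python) =====
-- def is_mixed(passwd):
--     """
--     패스워드의 적절성 검사
--     :param passwd:입력값
--     :return:bool로 리턴
--     """
--     numeric = False
--     alpha = False
--     special_char = False
--
--     for char in passwd:
--         if char.isalpha():
--             alpha = True
--         elif char.isnumeric():
--             numeric = True
--         else:
--             special_char = True
--     return (numeric and alpha) and special_char
--     if passwd.isalpha():
--         return False
--     elif passwd.isalnum():
--         return False
--     elif passwd.isnumeric():
--         return False
--     else:
--         return True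
-- ===== SOURCE B (Python) =====
-- def is_mixed(passwd):
--     alpha = any(c.isalpha() for c in passwd)
--     numeric = any(c.isnumeric() for c in passwd)
--     special = any((not c.isalpha()) and (not c.isnumeric()) for c in passwd)
--     return alpha and numeric and special
-- ===== Notes on version B (the rewrite author's own statement) =====
-- stated objective: idiomatic
-- what changed: Replaces the single loop carrying three mutable flags by three independent any(...) scans, one per requirement, combined at the end.
import Mathlib
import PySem

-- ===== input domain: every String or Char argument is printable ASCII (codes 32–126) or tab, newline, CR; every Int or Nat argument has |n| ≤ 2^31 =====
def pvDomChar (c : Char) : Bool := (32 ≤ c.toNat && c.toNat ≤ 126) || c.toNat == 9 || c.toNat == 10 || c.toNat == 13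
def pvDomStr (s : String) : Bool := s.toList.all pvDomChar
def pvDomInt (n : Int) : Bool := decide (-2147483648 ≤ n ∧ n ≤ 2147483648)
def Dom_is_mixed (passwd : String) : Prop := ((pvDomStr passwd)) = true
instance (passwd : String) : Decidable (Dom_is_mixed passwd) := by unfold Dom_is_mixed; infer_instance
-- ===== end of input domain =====

-- B replaces A's single loop over three mutable flags by three independent any-scans (idiomatic decomposition).

-- ===== PORT A =====
-- one fold over the characters carrying the three flags (numeric, alpha, special_char);
-- char.isnumeric agrees with isdigit on the printable-ASCII domain
def is_mixed (passwd : String) : Bool :=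
  let st := passwd.toList.foldl
    (fun (st : Bool × Bool × Bool) c =>
      if PySem.Chars.isalpha c then (st.1, true, st.2.2)
      else if PySem.Chars.isdigit c then (true, st.2.1, st.2.2)
      else (st.1, st.2.1, true))
    (false, false, false)
  (st.1 && st.2.1) && st.2.2

-- ===== PORT B =====
def is_mixed_alt (passwd : String) : Bool :=
  let alpha := passwd.toList.any (fun c => PySem.Chars.isalpha c)
  let numeric := passwd.toList.any (fun c => PySem.Chars.isdigit c)
  let special := passwd.toList.any (fun c => !(PySem.Chars.isalpha c) && !(PySem.Chars.isdigit c))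
  alpha && numeric && special

-- ===== PRECONDITION & SPEC =====
def Spec_is_mixed (passwd : String) (out : Bool) : Prop := out = is_mixed_alt passwd
instance (passwd : String) (out : Bool) : Decidable (Spec_is_mixed passwd out) := by unfold Spec_is_mixed; infer_instance

-- ===== CLAIM (what is proved, stated in full; the proofs are below) =====
def Claim_equal_is_mixed : Prop := ∀ (passwd : String), Dom_is_mixed passwd → Spec_is_mixed passwd (is_mixed passwd)

-- ===== LEMMAS AND PROOFS =====
theorem is_mixed_fold_char (l : List Char) (a b c : Bool) :
    l.foldl
      (fun (st : Bool × Bool × Bool) ch =>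
        if PySem.Chars.isalpha ch then (st.1, true, st.2.2)
        else if PySem.Chars.isdigit ch then (true, st.2.1, st.2.2)
        else (st.1, st.2.1, true))
      (a, b, c)
    = (a || l.any (fun ch => !(PySem.Chars.isalpha ch) && PySem.Chars.isdigit ch),
       b || l.any (fun ch => PySem.Chars.isalpha ch),
       c || l.any (fun ch => !(PySem.Chars.isalpha ch) && !(PySem.Chars.isdigit ch))) := by
  induction l generalizing a b c with
  | nil => simp
  | cons ch t ih =>
    simp only [List.foldl_cons, List.any_cons]
    by_cases h1 : PySem.Chars.isalpha ch
    · simp [h1, ih]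
    · by_cases h2 : PySem.Chars.isdigit ch
      · simp [h1, h2, ih]
      · simp [h1, h2, ih]

theorem digit_not_alpha (c : Char) (h : PySem.Chars.isdigit c = true) :
    PySem.Chars.isalpha c = false := by
  have h0 : ('0').val.toNat = 48 := rfl
  have h9 : ('9').val.toNat = 57 := rfl
  have hA : ('A').val.toNat = 65 := rfl
  have hZ : ('Z').val.toNat = 90 := rfl
  have ha : ('a').val.toNat = 97 := rfl
  have hz : ('z').val.toNat = 122 := rfl
  simp only [PySem.Chars.isdigit, PySem.Chars.isalpha, PySem.Chars.isupper, PySem.Chars.islower,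
    Bool.and_eq_true, decide_eq_true_eq, Char.le_def, UInt32.le_iff_toNat_le,
    h0, h9, hA, hZ, ha, hz,
    Bool.or_eq_false_iff, Bool.and_eq_false_iff, decide_eq_false_iff_not, not_le] at *
  omega

theorem not_alpha_and_digit (c : Char) :
    (!(PySem.Chars.isalpha c) && PySem.Chars.isdigit c) = PySem.Chars.isdigit c := by
  cases hd : PySem.Chars.isdigit c
  · simp
  · simp [digit_not_alpha c hd]

-- ===== VERDICT (by name: the statement is the Claim_ definition above) =====
theorem is_mixed_spec : Claim_equal_is_mixed := by
  intro passwd _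
  unfold Spec_is_mixed is_mixed is_mixed_alt
  simp only [is_mixed_fold_char, Bool.false_or, not_alpha_and_digit]
  cases passwd.toList.any (fun ch => PySem.Chars.isalpha ch) <;>
  cases passwd.toList.any (fun ch => PySem.Chars.isdigit ch) <;>
  cases passwd.toList.any (fun ch => !(PySem.Chars.isalpha ch) && !(PySem.Chars.isdigit ch)) <;>
  rfl
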